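-- pv_equiv track=rewrite | github.com/negarprh/Kakuro-Game | kakuro/services/board_service.py | _layout_runs
-- ===== SOURCE A (Python) =====
-- def _layout_runs(layout, direction):
--     rows = len(layout)
--     cols = len(layout[0])
--     runs = []
--
--     if direction == "across":
--         for r in range(rows):
--             c = 0
--             while c < cols:
--                 if layout[r][c] and (c == 0 or not layout[r][c - 1]):
--                     run = []
--                     while c < cols and layout[r][c]:
--                         run.append((r, c))
--                         c += 1
--                     if len(run) >= 2:
--                         runs.append(run)
--                 else:
--                     c += 1
--
--     if direction == "down":
--         for c in range(cols):
--             r = 0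
--             while r < rows:
--                 if layout[r][c] and (r == 0 or not layout[r - 1][c]):
--                     run = []
--                     while r < rows and layout[r][c]:
--                         run.append((r, c))
--                         r += 1
--                     if len(run) >= 2:
--                         runs.append(run)
--                 else:
--                     r += 1
--
--     return runs
-- ===== SOURCE B (Python) =====
-- def _layout_runs(layout, direction):
--     cols = len(layout[0])
--     if direction == "across":
--         lines = [[(r, c) for c in range(cols)] for r in range(len(layout))]
--     elif direction == "down":
--         lines = [[(r, c) for r in range(len(layout))] for c in range(cols)]
--     else:
--         return []
--     runs = []
--     for line in lines:
--         run = []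
--         for r, c in line:
--             if layout[r][c]:
--                 run.append((r, c))
--             else:
--                 if len(run) >= 2:
--                     runs.append(run)
--                 run = []
--         if len(run) >= 2:
--             runs.append(run)
--     return runs
-- ===== Notes on version B (the rewrite author's own statement) =====
-- stated objective: simpler
-- what changed: Replaced A's look-behind run-start detection with a nested consuming while-loop by a single flat scan of each row/column that keeps a current-run accumulator, flushed (kept if length >= 2) on every gap and at each line end.
import Mathlib
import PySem

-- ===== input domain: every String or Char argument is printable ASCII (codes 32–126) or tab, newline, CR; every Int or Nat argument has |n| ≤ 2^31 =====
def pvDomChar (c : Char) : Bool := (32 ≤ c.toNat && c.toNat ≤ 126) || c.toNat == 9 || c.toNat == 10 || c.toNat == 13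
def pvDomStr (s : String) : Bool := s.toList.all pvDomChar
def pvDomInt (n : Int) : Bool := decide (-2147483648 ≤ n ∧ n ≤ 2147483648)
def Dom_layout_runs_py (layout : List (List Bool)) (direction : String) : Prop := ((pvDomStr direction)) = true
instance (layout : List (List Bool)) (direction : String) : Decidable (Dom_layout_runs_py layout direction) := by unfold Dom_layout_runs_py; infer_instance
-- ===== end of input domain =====

-- B replaces A's look-behind run-start detection and nested consuming while-loop with a single
-- flat scan per row/column that keeps a current-run accumulator, flushed on gaps and line ends (objective: simpler).

-- cell lookup layout[r][c]; the default is never reached on inputs satisfying Pre_ (rectangular enough layouts)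
def pvCell (layout : List (List Bool)) (r c : Nat) : Bool :=
  (layout.getD r []).getD c false

-- ===== PORT A =====
-- inner 'while c < cols and layout[r][c]: run.append((r,c)); c += 1' (fuel ≥ cols - i suffices)
def aCollect (cell : Nat → Bool) (pair : Nat → Int × Int) (limit : Nat) :
    Nat → Nat → List (Int × Int) × Nat
  | 0, i => ([], i)
  | fuel+1, i =>
    if i < limit ∧ cell i = true then
      let rest := aCollect cell pair limit fuel (i+1)
      (pair i :: rest.1, rest.2)
    else ([], i)

-- outer 'while c < cols: if layout[r][c] and (c == 0 or not layout[r][c-1]): … else: c += 1'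
def aWhile (cell : Nat → Bool) (pair : Nat → Int × Int) (limit : Nat) :
    Nat → Nat → List (List (Int × Int)) → List (List (Int × Int))
  | 0, _, runs => runs
  | fuel+1, i, runs =>
    if i < limit then
      if cell i = true ∧ (i = 0 ∨ cell (i-1) = false) then
        let cr := aCollect cell pair limit limit i
        aWhile cell pair limit fuel cr.2 (if 2 ≤ cr.1.length then runs ++ [cr.1] else runs)
      else aWhile cell pair limit fuel (i+1) runs
    else runs

def layout_runs_py (layout : List (List Bool)) (direction : String) : List (List (Int × Int)) :=
  let rows := layout.length
  let cols := (layout.headD []).length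
  let runs : List (List (Int × Int)) := []
  let runs := if direction = "across" then
      (List.range rows).foldl
        (fun runs r => aWhile (fun c => pvCell layout r c) (fun c => ((r : Int), (c : Int))) cols cols 0 runs)
        runs
    else runs
  let runs := if direction = "down" then
      (List.range cols).foldl
        (fun runs c => aWhile (fun r => pvCell layout r c) (fun r => ((r : Int), (c : Int))) rows rows 0 runs)
        runs
    else runs
  runs

-- ===== PORT B =====
def bFlush (runs : List (List (Int × Int))) (run : List (Int × Int)) : List (List (Int × Int)) :=
  if 2 ≤ run.length then runs ++ [run] else runs

-- one flat pass over a line: push the cell onto the current run, or flush the run on a gap; flush at line end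
def bScanLine (layout : List (List Bool)) (runs : List (List (Int × Int))) (line : List (Nat × Nat)) :
    List (List (Int × Int)) :=
  let st := line.foldl
    (fun (st : List (List (Int × Int)) × List (Int × Int)) rc =>
      if pvCell layout rc.1 rc.2 then (st.1, st.2 ++ [((rc.1 : Int), (rc.2 : Int))])
      else (bFlush st.1 st.2, []))
    (runs, [])
  bFlush st.1 st.2

def layout_runs_py_alt (layout : List (List Bool)) (direction : String) : List (List (Int × Int)) :=
  let cols := (layout.headD []).length
  if direction = "across" then
    ((List.range layout.length).map (fun r => (List.range cols).map (fun c => (r, c)))).foldl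
      (bScanLine layout) []
  else if direction = "down" then
    ((List.range cols).map (fun c => (List.range layout.length).map (fun r => (r, c)))).foldl
      (bScanLine layout) []
  else []

-- ===== PRECONDITION & SPEC =====
-- Pre_ excludes exactly the inputs where the Python A raises IndexError: the empty layout
-- (len(layout[0])), and, for "across"/"down", layouts with some row shorter than the first row
-- (layout[r][c] is read for every c < len(layout[0])). A returns on everything Pre_ admits.
def Pre_layout_runs_py (layout : List (List Bool)) (direction : String) : Prop :=
  layout ≠ [] ∧ ((direction = "across" ∨ direction = "down") →
    ∀ row ∈ layout, (layout.headD []).length ≤ row.length)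
instance (layout : List (List Bool)) (direction : String) : Decidable (Pre_layout_runs_py layout direction) := by unfold Pre_layout_runs_py; infer_instance

def pvWitness_layout_runs_py : List (List Bool) × String :=
  ([[true, true, false], [false, true, true]], "across")

def Spec_layout_runs_py (layout : List (List Bool)) (direction : String) (out : List (List (Int × Int))) : Prop := out = layout_runs_py_alt layout direction
instance (layout : List (List Bool)) (direction : String) (out : List (List (Int × Int))) : Decidable (Spec_layout_runs_py layout direction out) := by unfold Spec_layout_runs_py; infer_instance

-- ===== CLAIM (what is proved, stated in full; the proofs are below) =====
def Claim_equal_layout_runs_py : Prop := ∀ (layout : List (List Bool)) (direction : String), Dom_layout_runs_py layout direction → Pre_layout_runs_py layout direction → Spec_layout_runs_py layout direction (layout_runs_py layout direction)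

-- ===== LEMMAS AND PROOFS =====

-- the abstract flat scan of B over a list of indices along one line
def pvScan (cell : Nat → Bool) (pair : Nat → Int × Int)
    (idxs : List Nat) (st : List (List (Int × Int)) × List (Int × Int)) :
    List (List (Int × Int)) × List (Int × Int) :=
  idxs.foldl (fun st i => if cell i then (st.1, st.2 ++ [pair i]) else (bFlush st.1 st.2, [])) st

lemma aCollect_spec (cell : Nat → Bool) (pair : Nat → Int × Int) (limit : Nat) :
    ∀ fuel i, limit - i ≤ fuel → i ≤ limit →
      i ≤ (aCollect cell pair limit fuel i).2 ∧
      (aCollect cell pair limit fuel i).2 ≤ limit ∧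
      ((aCollect cell pair limit fuel i).2 = limit ∨ cell (aCollect cell pair limit fuel i).2 = false) ∧
      (i < limit → cell i = true → i + 1 ≤ (aCollect cell pair limit fuel i).2) ∧
      ∀ runs run,
        pvScan cell pair (List.range' i (limit - i)) (runs, run)
          = pvScan cell pair
              (List.range' (aCollect cell pair limit fuel i).2 (limit - (aCollect cell pair limit fuel i).2))
              (runs, run ++ (aCollect cell pair limit fuel i).1) := by
  intro fuel
  induction fuel with
  | zero =>
    intro i h hle
    have hi : i = limit := by omega
    simp [aCollect, hi]
  | succ f ih =>
    intro i h hle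
    by_cases hc : i < limit ∧ cell i = true
    · obtain ⟨hil, hci⟩ := hc
      have hred : aCollect cell pair limit (f+1) i
          = (pair i :: (aCollect cell pair limit f (i+1)).1, (aCollect cell pair limit f (i+1)).2) := by
        simp [aCollect, hil, hci]
      have ih' := ih (i+1) (by omega) (by omega)
      rw [hred]
      refine ⟨by simpa using Nat.le_of_succ_le ih'.1, by simpa using ih'.2.1,
        by simpa using ih'.2.2.1, fun _ _ => by simpa using ih'.1, ?_⟩
      intro runs run
      have hrange : List.range' i (limit - i) = i :: List.range' (i+1) (limit - (i+1)) := by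
        have hsub : limit - i = (limit - (i+1)) + 1 := by omega
        rw [hsub, List.range'_succ]
      rw [hrange]
      simp only [pvScan, List.foldl_cons, hci, if_true]
      have hrec := ih'.2.2.2.2 runs (run ++ [pair i])
      simp only [pvScan] at hrec ⊢
      rw [hrec]
      simp
    · have hred : aCollect cell pair limit (f+1) i = ([], i) := by
        simp only [aCollect, if_neg hc]
      rw [hred]
      refine ⟨le_refl _, hle, ?_, fun hil hci => absurd ⟨hil, hci⟩ hc, fun runs run => by simp [pvScan]⟩
      rcases Nat.lt_or_ge i limit with hil | hil
      · right
        cases hcb : cell i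
        · rfl
        · exact absurd ⟨hil, hcb⟩ hc
      · left; omega

lemma aWhile_eq_scan (cell : Nat → Bool) (pair : Nat → Int × Int) (limit : Nat) :
    ∀ fuel i runs, limit - i ≤ fuel →
      (i = 0 ∨ cell (i-1) = false ∨ limit ≤ i ∨ cell i = false) →
      aWhile cell pair limit fuel i runs
        = bFlush (pvScan cell pair (List.range' i (limit - i)) (runs, [])).1
                 (pvScan cell pair (List.range' i (limit - i)) (runs, [])).2 := by
  intro fuel
  induction fuel with
  | zero =>
    intro i runs h _
    have hi : limit ≤ i := by omega
    simp [aWhile, Nat.sub_eq_zero_of_le hi, pvScan, bFlush]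
  | succ f ih =>
    intro i runs h hinv
    by_cases hil : i < limit
    · have hrange : List.range' i (limit - i) = i :: List.range' (i+1) (limit - (i+1)) := by
        have hsub : limit - i = (limit - (i+1)) + 1 := by omega
        rw [hsub, List.range'_succ]
      by_cases hci : cell i = true
      · have hstart : i = 0 ∨ cell (i-1) = false := by
          rcases hinv with h0 | hf | hge | hf
          · exact Or.inl h0
          · exact Or.inr hf
          · omega
          · rw [hci] at hf; exact absurd hf (by simp)
        have hcond : cell i = true ∧ (i = 0 ∨ cell (i-1) = false) := ⟨hci, hstart⟩
        simp only [aWhile, if_pos hil, if_pos hcond]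
        have hcol := aCollect_spec cell pair limit limit i (by omega) (by omega)
        set i' := (aCollect cell pair limit limit i).2 with hi'
        set blk := (aCollect cell pair limit limit i).1 with hblk
        have hstep : i + 1 ≤ i' := hcol.2.2.2.1 hil hci
        have hle : i' ≤ limit := hcol.2.1
        have hend : i' = limit ∨ cell i' = false := hcol.2.2.1
        have hscan := hcol.2.2.2.2 runs []
        simp only [List.nil_append] at hscan
        rw [hscan]
        rw [ih i' (if 2 ≤ blk.length then runs ++ [blk] else runs) (by omega)
             (by rcases hend with he | hf
                 · right; right; left; omega
                 · right; right; right; exact hf)]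
        rcases Nat.lt_or_ge i' limit with hlt | hge
        · have hf : cell i' = false := by
            rcases hend with he | hf
            · exact absurd he (Nat.ne_of_lt hlt)
            · exact hf
          have hrange' : List.range' i' (limit - i') = i' :: List.range' (i'+1) (limit - (i'+1)) := by
            have hsub : limit - i' = (limit - (i'+1)) + 1 := by omega
            rw [hsub, List.range'_succ]
          rw [hrange']
          simp [pvScan, bFlush, hf]
        · have hz : limit - i' = 0 := by omega
          rw [hz]
          simp [pvScan, bFlush]
      · have hcif : cell i = false := by
          cases hcb : cell i
          · rfl
          · exact absurd hcb hci
        have hcond : ¬(cell i = true ∧ (i = 0 ∨ cell (i-1) = false)) := fun hx => by rw [hcif] at hx; exact absurd hx.1 (by simp)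
        simp only [aWhile, if_pos hil, if_neg hcond]
        rw [ih (i+1) runs (by omega) (by right; left; simpa using hcif)]
        rw [hrange]
        simp [pvScan, hcif, bFlush]
    · simp [aWhile, Nat.sub_eq_zero_of_le (by omega : limit ≤ i), pvScan, bFlush, hil]

lemma bScanLine_across (layout : List (List Bool)) (r cols : Nat) (runs : List (List (Int × Int))) :
    bScanLine layout runs ((List.range cols).map (fun c => (r, c)))
      = aWhile (fun c => pvCell layout r c) (fun c => ((r : Int), (c : Int))) cols cols 0 runs := by
  rw [aWhile_eq_scan (fun c => pvCell layout r c) (fun c => ((r : Int), (c : Int))) cols cols 0 runs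
        (by omega) (Or.inl rfl)]
  simp [bScanLine, pvScan, List.foldl_map, List.range_eq_range']

lemma bScanLine_down (layout : List (List Bool)) (c rows : Nat) (runs : List (List (Int × Int))) :
    bScanLine layout runs ((List.range rows).map (fun r => (r, c)))
      = aWhile (fun r => pvCell layout r c) (fun r => ((r : Int), (c : Int))) rows rows 0 runs := by
  rw [aWhile_eq_scan (fun r => pvCell layout r c) (fun r => ((r : Int), (c : Int))) rows rows 0 runs
        (by omega) (Or.inl rfl)]
  simp [bScanLine, pvScan, List.foldl_map, List.range_eq_range']

-- ===== VERDICT (by name: the statement is the Claim_ definition above) =====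
theorem layout_runs_py_spec : Claim_equal_layout_runs_py := by
  intro layout direction _ _
  unfold Spec_layout_runs_py
  simp only [layout_runs_py, layout_runs_py_alt]
  by_cases h1 : direction = "across"
  · subst h1
    simp only [if_neg (by decide : ¬("across" = "down"))]
    rw [List.foldl_map]
    have hfun : (fun (runs : List (List (Int × Int))) (r : Nat) =>
          aWhile (fun c => pvCell layout r c) (fun c => ((r : Int), (c : Int)))
            (layout.headD []).length (layout.headD []).length 0 runs)
        = fun runs r => bScanLine layout runs ((List.range (layout.headD []).length).map (fun c => (r, c))) := by
      funext runs r
      exact (bScanLine_across layout r (layout.headD []).length runs).symm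
    rw [hfun]
  · by_cases h2 : direction = "down"
    · subst h2
      simp only [if_neg (by decide : ¬("down" = "across"))]
      rw [List.foldl_map]
      have hfun : (fun (runs : List (List (Int × Int))) (c : Nat) =>
            aWhile (fun r => pvCell layout r c) (fun r => ((r : Int), (c : Int)))
              layout.length layout.length 0 runs)
          = fun runs c => bScanLine layout runs ((List.range layout.length).map (fun r => (r, c))) := by
        funext runs c
        exact (bScanLine_down layout c layout.length runs).symm
      rw [hfun]
    · simp [h1, h2]
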